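-- pv_equiv track=rewrite | github.com/wxsms/TensorRT-Model-Optimizer | modelopt/torch/sparsity/attention_sparsity/calibration/ruler_dataset.py | _generate_target_lengths
-- ===== SOURCE A (Python) =====
-- def _generate_target_lengths(
--     max_seqlen: int, num_length_bins: int = 4, min_seqlen: int = 1024
-- ) -> list[int]:
--     """Generate target lengths as descending powers of 2.
--
--     Args:
--         max_seqlen: Maximum sequence length
--         num_length_bins: Maximum number of length bins to generate
--         min_seqlen: Minimum sequence length threshold
--
--     Returns:
--         List of target lengths in descending order
--
--     Examples:
--         >>> _generate_target_lengths(32768, 4)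
--         [32768, 16384, 8192, 4096]
--         >>> _generate_target_lengths(2048, 4)
--         [2048, 1024]
--     """
--     target_lengths = []
--     current = max_seqlen
--
--     for _ in range(num_length_bins):
--         if current < min_seqlen:
--             break
--         target_lengths.append(current)
--         current = current // 2
--
--     return target_lengths
-- ===== SOURCE B (Python) =====
-- def _generate_target_lengths(
--     max_seqlen: int, num_length_bins: int = 4, min_seqlen: int = 1024
-- ) -> list[int]:
--     """Closed-form version: compute how many halvings stay above the
--     threshold, then generate the list directly."""
--     if num_length_bins <= 0 or max_seqlen < min_seqlen:
--         return []
--     if min_seqlen <= 0: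
--         # threshold never cuts the sequence off
--         count = num_length_bins
--     else:
--         count = min(num_length_bins, (max_seqlen // min_seqlen).bit_length())
--     return [max_seqlen // 2**i for i in range(count)]
-- ===== Notes on version B (the rewrite author's own statement) =====
-- stated objective: alternative
-- what changed: Replaces the test-and-break halving loop by a closed-form count of surviving elements (bit_length of max_seqlen // min_seqlen, capped by num_length_bins, with the degenerate cases handled up front) followed by direct generation of the list as max_seqlen // 2**i.
import Mathlib
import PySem

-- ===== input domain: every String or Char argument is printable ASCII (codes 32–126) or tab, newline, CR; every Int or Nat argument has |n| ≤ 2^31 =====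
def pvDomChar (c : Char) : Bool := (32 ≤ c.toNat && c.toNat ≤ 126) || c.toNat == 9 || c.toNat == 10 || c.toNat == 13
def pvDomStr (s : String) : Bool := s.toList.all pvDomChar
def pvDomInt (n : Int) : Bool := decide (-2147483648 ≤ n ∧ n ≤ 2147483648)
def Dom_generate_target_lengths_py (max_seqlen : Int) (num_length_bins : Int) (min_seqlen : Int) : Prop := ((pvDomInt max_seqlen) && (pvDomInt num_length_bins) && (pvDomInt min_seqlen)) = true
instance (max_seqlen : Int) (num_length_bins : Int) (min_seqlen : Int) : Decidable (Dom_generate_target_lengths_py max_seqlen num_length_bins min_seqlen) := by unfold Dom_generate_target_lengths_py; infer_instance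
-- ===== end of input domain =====

-- B replaces A's test-and-break halving loop by a closed-form element count
-- (via floor division and bit_length) followed by direct list generation (objective: alternative).

-- ===== PORT A =====
-- the 'for _ in range(num_length_bins)' loop with its break, appending to target_lengths
def genTL_loop (fuel : Nat) (target_lengths : List Int) (current : Int) (min_seqlen : Int) : List Int :=
  match fuel with
  | 0 => target_lengths
  | Nat.succ n =>
    if current < min_seqlen then target_lengths
    else genTL_loop n (target_lengths ++ [current]) (PySem.Int.floordiv current 2) min_seqlen

def generate_target_lengths_py (max_seqlen : Int) (num_length_bins : Int) (min_seqlen : Int) : List Int :=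
  genTL_loop num_length_bins.toNat [] max_seqlen min_seqlen

-- ===== PORT B =====
def generate_target_lengths_py_alt (max_seqlen : Int) (num_length_bins : Int) (min_seqlen : Int) : List Int :=
  if num_length_bins ≤ 0 ∨ max_seqlen < min_seqlen then []
  else
    (PySem.List.pyRange 0
      (if min_seqlen ≤ 0 then num_length_bins
       else min num_length_bins ((PySem.Int.bitLength (PySem.Int.floordiv max_seqlen min_seqlen) : Int))) 1).map
      (fun i => PySem.Int.floordiv max_seqlen (2 ^ i.toNat))

-- ===== PRECONDITION & SPEC =====
def Spec_generate_target_lengths_py (max_seqlen : Int) (num_length_bins : Int) (min_seqlen : Int) (out : List Int) : Prop := out = generate_target_lengths_py_alt max_seqlen num_length_bins min_seqlen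
instance (max_seqlen : Int) (num_length_bins : Int) (min_seqlen : Int) (out : List Int) : Decidable (Spec_generate_target_lengths_py max_seqlen num_length_bins min_seqlen out) := by unfold Spec_generate_target_lengths_py; infer_instance

-- ===== CLAIM (what is proved, stated in full; the proofs are below) =====
def Claim_equal_generate_target_lengths_py : Prop := ∀ (max_seqlen : Int) (num_length_bins : Int) (min_seqlen : Int), Dom_generate_target_lengths_py max_seqlen num_length_bins min_seqlen → Spec_generate_target_lengths_py max_seqlen num_length_bins min_seqlen (generate_target_lengths_py max_seqlen num_length_bins min_seqlen)

-- ===== LEMMAS AND PROOFS =====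

-- the halving sequence with break, without the accumulator
def refSeq : Nat → Int → Int → List Int
  | 0, _, _ => []
  | Nat.succ n, cur, m =>
    if cur < m then [] else cur :: refSeq n (PySem.Int.floordiv cur 2) m

theorem genTL_loop_eq (fuel : Nat) : ∀ (acc : List Int) (cur m : Int),
    genTL_loop fuel acc cur m = acc ++ refSeq fuel cur m := by
  induction fuel with
  | zero => intro acc cur m; simp [genTL_loop, refSeq]
  | succ n ih =>
    intro acc cur m
    by_cases h : cur < m
    · simp [genTL_loop, refSeq, h]
    · simp [genTL_loop, refSeq, h, ih]

theorem floordiv_floordiv_two (cur : Int) (i : Nat) :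
    PySem.Int.floordiv (PySem.Int.floordiv cur 2) (2 ^ i) =
      PySem.Int.floordiv cur (2 ^ (i + 1)) := by
  have h2 : (0:Int) < 2 := by norm_num
  have hi : (0:Int) < 2 ^ i := by positivity
  have hi1 : (0:Int) < 2 ^ (i + 1) := by positivity
  rw [PySem.Int.floordiv_eq_ediv_of_pos h2, PySem.Int.floordiv_eq_ediv_of_pos hi,
    PySem.Int.floordiv_eq_ediv_of_pos hi1, Int.ediv_ediv_of_nonneg (by norm_num)]
  congr 1
  ring

theorem refSeq_eq_takeWhile (n : Nat) : ∀ (cur m : Int),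
    refSeq n cur m =
      ((List.range n).map (fun i => PySem.Int.floordiv cur (2 ^ i))).takeWhile
        (fun x => decide (m ≤ x)) := by
  induction n with
  | zero => intro cur m; simp [refSeq]
  | succ k ih =>
    intro cur m
    rw [List.range_succ_eq_map, List.map_cons]
    have h0 : PySem.Int.floordiv cur (2 ^ 0) = cur := by
      rw [pow_zero, PySem.Int.floordiv_eq_ediv_of_pos (by norm_num), Int.ediv_one]
    by_cases h : cur < m
    · simp [refSeq, h, not_le.mpr h]
    · rw [List.takeWhile_cons]
      simp only [h0, not_lt.mp h, if_pos, decide_true]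
      simp only [refSeq, h, ite_false]
      rw [ih, List.map_map]
      have hfun : ((fun i => PySem.Int.floordiv cur (2 ^ i)) ∘ Nat.succ) =
          fun i => PySem.Int.floordiv (PySem.Int.floordiv cur 2) (2 ^ i) := by
        funext i
        simp only [Function.comp]
        rw [floordiv_floordiv_two]
      rw [hfun]

theorem takeWhile_map_range (N : Nat) : ∀ (K : Nat) (f : Nat → Int) (p : Int → Bool),
    (∀ i, i < N → p (f i) = decide (i < K)) →
    ((List.range N).map f).takeWhile p = (List.range (min N K)).map f := by
  induction N with
  | zero => intro K f p _; simp
  | succ n ih =>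
    intro K f p hp
    rw [List.range_succ_eq_map, List.map_cons, List.takeWhile_cons]
    cases K with
    | zero =>
      have : p (f 0) = false := by rw [hp 0 (by omega)]; simp
      simp [this]
    | succ k =>
      have h0 : p (f 0) = true := by rw [hp 0 (by omega)]; simp
      rw [h0]
      simp only [if_pos, List.map_map]
      rw [ih k (f ∘ Nat.succ) p ?_]
      · have hm : min (n + 1) (k + 1) = (min n k) + 1 := by omega
        rw [hm, List.range_succ_eq_map, List.map_cons, List.map_map]
      · intro i hi
        have := hp (i + 1) (by omega)
        simp only [Function.comp]
        rw [this]
        exact decide_eq_decide.mpr (by omega)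

-- for m > 0, the i-th halving passes the threshold iff i < bitLength (max // m)
theorem pred_iff_lt_bitLength (maxv m : Int) (hm : 0 < m) (hmax : m ≤ maxv) (i : Nat) :
    (m ≤ PySem.Int.floordiv maxv (2 ^ i)) ↔
      i < PySem.Int.bitLength (PySem.Int.floordiv maxv m) := by
  have hi : (0:Int) < 2 ^ i := by positivity
  set q := PySem.Int.floordiv maxv m with hq
  have hq1 : 1 ≤ q := by
    rw [hq, PySem.Int.le_floordiv_iff_mul_le hm]
    linarith
  have hstep : (m ≤ PySem.Int.floordiv maxv (2 ^ i)) ↔ ((2:Int) ^ i ≤ q) := by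
    rw [PySem.Int.le_floordiv_iff_mul_le hi, hq, PySem.Int.le_floordiv_iff_mul_le hm]
    constructor <;> intro h <;> linarith [mul_comm m ((2:Int) ^ i)]
  rw [hstep]
  have hup := PySem.Int.lt_two_pow_bitLength q
  have hlo := PySem.Int.two_pow_bitLength_le q (by omega)
  set K := PySem.Int.bitLength q with hK
  have hq' : (q.natAbs : Int) = q := by omega
  have hupZ : q < (2:Int) ^ K := by
    have h' : (q.natAbs : Int) < ((2 ^ K : Nat) : Int) := by exact_mod_cast hup
    push_cast at h'
    rw [abs_of_pos (by omega : (0:Int) < q)] at h'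
    exact h'
  have hloZ : (2:Int) ^ (K - 1) ≤ q := by
    have h' : ((2 ^ (K - 1) : Nat) : Int) ≤ (q.natAbs : Int) := by exact_mod_cast hlo
    push_cast at h'
    rw [abs_of_pos (by omega : (0:Int) < q)] at h'
    exact h'
  constructor
  · intro h
    by_contra hKi
    rw [not_lt] at hKi
    have h2 : (2:Int) ^ K ≤ 2 ^ i := pow_le_pow_right₀ (by norm_num) hKi
    linarith
  · intro h
    have h2 : (2:Int) ^ i ≤ 2 ^ (K - 1) := pow_le_pow_right₀ (by norm_num) (by omega)
    linarith

-- every halving stays ≥ m when m ≤ 0 and m ≤ maxv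
theorem pred_always (maxv m : Int) (hm : m ≤ 0) (hmax : m ≤ maxv) (i : Nat) :
    m ≤ PySem.Int.floordiv maxv (2 ^ i) := by
  have hi : (0:Int) < 2 ^ i := by positivity
  rw [PySem.Int.le_floordiv_iff_mul_le hi]
  have h1 : m * 2 ^ i ≤ m * 1 := mul_le_mul_of_nonpos_left (by linarith) hm
  linarith

-- ===== VERDICT (by name: the statement is the Claim_ definition above) =====
theorem generate_target_lengths_py_spec : Claim_equal_generate_target_lengths_py := by
  intro maxv nb m _
  unfold Spec_generate_target_lengths_py generate_target_lengths_py generate_target_lengths_py_alt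
  rw [genTL_loop_eq, List.nil_append, refSeq_eq_takeWhile]
  by_cases hnb : nb ≤ 0
  · simp [hnb, Int.toNat_of_nonpos hnb]
  · by_cases hlt : maxv < m
    · cases hn : nb.toNat with
      | zero => simp [hlt, hnb]
      | succ k =>
        rw [List.range_succ_eq_map, List.map_cons, List.takeWhile_cons]
        simp [hlt, hnb, not_le.mpr hlt]
    · rw [not_le] at hnb; rw [not_lt] at hlt
      rw [if_neg (by omega)]
      by_cases hm : m ≤ 0
      · -- threshold never cuts: full list of nb.toNat elements
        rw [if_pos hm]
        rw [List.takeWhile_eq_self_iff.mpr ?_]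
        · rw [PySem.List.pyRange_one, List.map_map]
          simp
        · intro x hx
          simp only [List.mem_map, List.mem_range] at hx
          obtain ⟨i, _, rfl⟩ := hx
          simpa using pred_always maxv m hm hlt i
      · rw [not_le] at hm
        rw [if_neg (by omega)]
        set K := PySem.Int.bitLength (PySem.Int.floordiv maxv m) with hK
        rw [takeWhile_map_range nb.toNat K _ _ ?_]
        · rw [PySem.List.pyRange_one, List.map_map]
          have : ((min nb (K : Int)) - 0).toNat = min nb.toNat K := by omega
          rw [this]
          simp
        · intro i _
          rw [decide_eq_decide]
          exact pred_iff_lt_bitLength maxv m hm hlt i
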